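-- pv_equiv track=rewrite | github.com/Trump68/JAV | dodnld.py | get_downloadable_url
-- ===== SOURCE A (Python) =====
-- def get_downloadable_url(
--     urls: list[str], prefer_voe_player: bool = False, video_code: str | None = None
-- ) -> str | None:
--     """Pick best URL for downloading. Stream in player is supjav.com@<code>-ub.mp4 (e.g. rbd-764-ub).
--     If video_code (e.g. rbd-764): prefer m3u8 or player URL that contains this code.
--     If prefer_voe_player: prefer VOE player pages (supremejav, turbovidhls) to open and get m3u8 from.
--     """
--     # Skip blob: — not directly downloadable
--     candidates = [u for u in urls if u.startswith("http://") or u.startswith("https://")]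
--     if not candidates:
--         return None
--     lower_code = (video_code or "").lower().replace(" ", "")
--
--     # Prefer URL that matches the page video (e.g. contains rbd-764 / supjav.com@rbd-764-ub)
--     if lower_code:
--         for u in candidates:
--             if lower_code in u.lower() or f"{lower_code}-ub" in u.lower():
--                 if ".m3u8" in u.lower() and "_HLS_msn" not in u:
--                     return u
--         for u in candidates:
--             if lower_code in u.lower():
--                 return u
--         # Prefer VOE player URLs that might serve this video (supremejav, turbovidhls)
--         player = [u for u in candidates if "supremejav.com/supjav" in u.lower() or "turbovidhls.com/t/" in u.lower()]
--         if player: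
--             return player[0]
--
--     if prefer_voe_player:
--         player = [u for u in candidates if "supremejav.com/supjav" in u.lower() or "turbovidhls.com/t/" in u.lower()]
--         if player:
--             return player[0]
--         # Do not use doppiocdn — wrong video; only supremejav/turbovidhls for correct stream
--         return None
--
--     # Streamtape: prefer get_video URL (downloadable) over embed /e/ (yt-dlp can't use it)
--     get_video = [u for u in candidates if "streamtape" in u.lower() and "get_video" in u.lower()]
--     if get_video:
--         return get_video[0]
--
--     # Prefer master playlist m3u8 (no _HLS_msn / _HLS_part)
--     m3u8_master = [u for u in candidates if ".m3u8" in u.lower() and "_HLS_msn" not in u and "_HLS_part" not in u]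
--     if m3u8_master:
--         return m3u8_master[0]
--     for u in candidates:
--         if ".m3u8" in u.lower():
--             return u
--     return candidates[0]
-- ===== SOURCE B (Python) =====
-- def get_downloadable_url(
--     urls: list[str], prefer_voe_player: bool = False, video_code: str | None = None
-- ) -> str | None:
--     """Single pass: rank each http(s) candidate by a priority tier and return the
--     first URL achieving the smallest tier (None if nothing qualifies)."""
--     lower_code = (video_code or "").lower().replace(" ", "")
--
--     def tier(u):
--         lu = u.lower()
--         is_player = "supremejav.com/supjav" in lu or "turbovidhls.com/t/" in lu
--         if lower_code:
--             if lower_code in lu: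
--                 if ".m3u8" in lu and "_HLS_msn" not in u:
--                     return 0
--                 return 1
--             if is_player:
--                 return 2
--         if prefer_voe_player:
--             if not lower_code and is_player:
--                 return 2
--             return None  # only player pages qualify; anything else is unusable
--         if "streamtape" in lu and "get_video" in lu:
--             return 3
--         if ".m3u8" in lu:
--             if "_HLS_msn" not in u and "_HLS_part" not in u:
--                 return 4
--             return 5
--         return 6
--
--     best = None  # (tier, url); strict '<' keeps the earliest URL per tier
--     for u in urls:
--         if not (u.startswith("http://") or u.startswith("https://")):
--             continue
--         t = tier(u)
--         if t is not None and (best is None or t < best[0]):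
--             best = (t, u)
--     return best[1] if best is not None else None
-- ===== Notes on version B (the rewrite author's own statement) =====
-- stated objective: alternative
-- what changed: Replaces A's cascade of up to seven separate scans/filters over the candidate list by a single pass that assigns each http(s) URL a priority tier and keeps the earliest URL of the smallest tier.
import Mathlib
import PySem

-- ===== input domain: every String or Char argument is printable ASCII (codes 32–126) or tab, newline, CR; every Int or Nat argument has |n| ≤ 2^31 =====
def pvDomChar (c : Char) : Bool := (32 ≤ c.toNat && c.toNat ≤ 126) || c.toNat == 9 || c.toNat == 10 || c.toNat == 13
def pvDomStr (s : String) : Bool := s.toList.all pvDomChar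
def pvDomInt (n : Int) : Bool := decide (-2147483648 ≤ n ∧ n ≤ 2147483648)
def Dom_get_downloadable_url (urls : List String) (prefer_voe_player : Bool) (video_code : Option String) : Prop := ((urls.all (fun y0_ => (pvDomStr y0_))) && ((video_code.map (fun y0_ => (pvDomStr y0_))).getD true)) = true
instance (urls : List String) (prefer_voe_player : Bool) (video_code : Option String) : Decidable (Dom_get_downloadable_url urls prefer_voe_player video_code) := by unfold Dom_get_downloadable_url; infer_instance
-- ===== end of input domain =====

-- B replaces A's cascade of up to seven separate scans/filters of the candidate list by one
-- single pass that ranks every http(s) URL with a priority tier and keeps the earliest URL of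
-- the smallest tier (objective: alternative decomposition, same observable result).

-- ===== PORT A =====
-- helpers: the seven candidate conditions A tests, in A's order
def pvIsHttp (u : String) : Bool :=
  PySem.Str.startswith u "http://" || PySem.Str.startswith u "https://"
def pvC0 (lc : String) (u : String) : Bool :=
  (PySem.Str.isIn lc (PySem.Str.lower u) || PySem.Str.isIn (lc ++ "-ub") (PySem.Str.lower u)) &&
    (PySem.Str.isIn ".m3u8" (PySem.Str.lower u) && !PySem.Str.isIn "_HLS_msn" u)
def pvC1 (lc : String) (u : String) : Bool := PySem.Str.isIn lc (PySem.Str.lower u)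
def pvC2 (u : String) : Bool :=
  PySem.Str.isIn "supremejav.com/supjav" (PySem.Str.lower u) ||
    PySem.Str.isIn "turbovidhls.com/t/" (PySem.Str.lower u)
def pvC3 (u : String) : Bool :=
  PySem.Str.isIn "streamtape" (PySem.Str.lower u) && PySem.Str.isIn "get_video" (PySem.Str.lower u)
def pvC4 (u : String) : Bool :=
  PySem.Str.isIn ".m3u8" (PySem.Str.lower u) && !PySem.Str.isIn "_HLS_msn" u && !PySem.Str.isIn "_HLS_part" u
def pvC5 (u : String) : Bool := PySem.Str.isIn ".m3u8" (PySem.Str.lower u)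

-- the part of A after the lower_code block (the `if prefer_voe_player:` section onwards);
-- `candidates[0]` is ported as head? — A's caller only reaches it with candidates nonempty
def pvGeneral (candidates : List String) (prefer_voe_player : Bool) : Option String :=
  if prefer_voe_player then
    match candidates.filter pvC2 with
    | p :: _ => some p
    | [] => none
  else
    match candidates.filter pvC3 with
    | g :: _ => some g
    | [] =>
      match candidates.filter pvC4 with
      | m :: _ => some m
      | [] =>
        match candidates.find? pvC5 with
        | some u => some u
        | none => candidates.head?

def get_downloadable_url (urls : List String) (prefer_voe_player : Bool) (video_code : Option String) : Option String :=
  let candidates := urls.filter pvIsHttp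
  if candidates.isEmpty then none
  else
    let lc := PySem.Str.replace (PySem.Str.lower (video_code.getD "")) " " ""
    if lc == "" then pvGeneral candidates prefer_voe_player
    else
      match candidates.find? (pvC0 lc) with
      | some u => some u
      | none =>
        match candidates.find? (pvC1 lc) with
        | some u => some u
        | none =>
          match candidates.filter pvC2 with
          | p :: _ => some p
          | [] => pvGeneral candidates prefer_voe_player

-- ===== PORT B =====
-- B's tier function: smaller tier = higher priority; none = not usable at all
def pvTier (lc : String) (prefer_voe_player : Bool) (u : String) : Option Nat :=
  let lu := PySem.Str.lower u
  let isPlayer := PySem.Str.isIn "supremejav.com/supjav" lu || PySem.Str.isIn "turbovidhls.com/t/" lu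
  if (lc != "") && PySem.Str.isIn lc lu then
    if PySem.Str.isIn ".m3u8" lu && !PySem.Str.isIn "_HLS_msn" u then some 0 else some 1
  else if (lc != "") && isPlayer then some 2
  else if prefer_voe_player then
    if (lc == "") && isPlayer then some 2 else none
  else if PySem.Str.isIn "streamtape" lu && PySem.Str.isIn "get_video" lu then some 3
  else if PySem.Str.isIn ".m3u8" lu then
    if !PySem.Str.isIn "_HLS_msn" u && !PySem.Str.isIn "_HLS_part" u then some 4 else some 5
  else some 6

-- B's loop body: skip non-http(s) URLs, keep the strictly best (tier, url) seen so far
def pvStep (lc : String) (prefer_voe_player : Bool) (best : Option (Nat × String)) (u : String) :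
    Option (Nat × String) :=
  if !(PySem.Str.startswith u "http://" || PySem.Str.startswith u "https://") then best
  else
    match pvTier lc prefer_voe_player u with
    | none => best
    | some t =>
      match best with
      | none => some (t, u)
      | some (bt, bu) => if t < bt then some (t, u) else some (bt, bu)

def get_downloadable_url_alt (urls : List String) (prefer_voe_player : Bool) (video_code : Option String) : Option String :=
  let lc := PySem.Str.replace (PySem.Str.lower (video_code.getD "")) " " ""
  (urls.foldl (pvStep lc prefer_voe_player) none).map Prod.snd

-- ===== PRECONDITION & SPEC =====
def Spec_get_downloadable_url (urls : List String) (prefer_voe_player : Bool) (video_code : Option String) (out : Option String) : Prop := out = get_downloadable_url_alt urls prefer_voe_player video_code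
instance (urls : List String) (prefer_voe_player : Bool) (video_code : Option String) (out : Option String) : Decidable (Spec_get_downloadable_url urls prefer_voe_player video_code out) := by unfold Spec_get_downloadable_url; infer_instance

-- ===== CLAIM (what is proved, stated in full; the proofs are below) =====
def Claim_equal_get_downloadable_url : Prop := ∀ (urls : List String) (prefer_voe_player : Bool) (video_code : Option String), Dom_get_downloadable_url urls prefer_voe_player video_code → Spec_get_downloadable_url urls prefer_voe_player video_code (get_downloadable_url urls prefer_voe_player video_code)

-- ===== LEMMAS AND PROOFS =====

-- ---- generic machinery: a cascade of find?s equals picking the first element of minimal tier ----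

-- A's shape: try the conditions one after the other, each by a fresh scan of the list
def pvCascade : List (String → Bool) → List String → Option String
  | [], _ => none
  | c :: cs, l => match l.find? c with
    | some u => some u
    | none => pvCascade cs l

-- the tier induced by a condition list: index of the first condition that holds
def pvTf (cs : List (String → Bool)) (u : String) : Option Nat := cs.findIdx? (fun c => c u)

-- left-biased minimum of two optional ranked entries
def pvComb : Option (Nat × String) → Option (Nat × String) → Option (Nat × String)
  | none, y => y
  | some x, none => some x
  | some (j, v), some (k, u) => if k < j then some (k, u) else some (j, v)

def pvOmin : Option Nat → Option Nat → Option Nat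
  | none, b => b
  | some a, none => some a
  | some a, some b => some (min a b)

-- minimal tier in the list
def pvMinT (t : String → Option Nat) : List String → Option Nat
  | [] => none
  | u :: r => pvOmin (t u) (pvMinT t r)

-- first element of minimal tier, with its tier
def pvArg (t : String → Option Nat) (l : List String) : Option (Nat × String) :=
  match pvMinT t l with
  | none => none
  | some m => (l.find? (fun u => t u == some m)).map (fun u => (m, u))

def pvPick (t : String → Option Nat) (l : List String) : Option String :=
  match pvMinT t l with
  | none => none
  | some m => l.find? (fun u => t u == some m)

lemma pvFind_congr (l : List String) (p q : String → Bool) (h : ∀ v ∈ l, p v = q v) :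
    l.find? p = l.find? q := by
  induction l with
  | nil => rfl
  | cons u r ih =>
    simp only [List.find?]
    rw [h u (by simp)]
    cases q u
    · exact ih fun v hv => h v (by simp [hv])
    · rfl

lemma pvComb_none_right (x : Option (Nat × String)) : pvComb x none = x := by
  cases x <;> rfl

lemma pvComb_some (j k : Nat) (v u : String) :
    pvComb (some (j, v)) (some (k, u)) = if k < j then some (k, u) else some (j, v) := rfl

lemma pvComb_assoc (a b c : Option (Nat × String)) :
    pvComb (pvComb a b) c = pvComb a (pvComb b c) := by
  rcases a with _ | ⟨j, v⟩
  · rfl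
  rcases b with _ | ⟨k, u⟩
  · rfl
  rcases c with _ | ⟨m, w⟩
  · simp [pvComb_none_right]
  simp only [pvComb_some]
  split_ifs <;> simp only [pvComb_some, pvComb_none_right] <;> split_ifs <;>
    first | rfl | omega | (exfalso; omega)

lemma pvStep_eq (lc : String) (voe : Bool) (b : Option (Nat × String)) (u : String) :
    pvStep lc voe b u =
      if pvIsHttp u then pvComb b ((pvTier lc voe u).map (fun t => (t, u))) else b := by
  rcases hb : b with _ | ⟨bt, bu⟩ <;> rcases ht : pvTier lc voe u with _ | t <;>
    simp [pvStep, pvIsHttp, ht, pvComb] <;> split_ifs <;> simp_all [pvComb]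

lemma pvFoldl_comb (tag : String → Option (Nat × String)) (l : List String)
    (b : Option (Nat × String)) :
    l.foldl (fun b u => pvComb b (tag u)) b =
      pvComb b (l.foldl (fun b u => pvComb b (tag u)) none) := by
  induction l generalizing b with
  | nil => simp [List.foldl, pvComb_none_right]
  | cons u r ih =>
    simp only [List.foldl]
    rw [ih, ih (pvComb none (tag u))]
    rw [← pvComb_assoc]
    cases htag : tag u <;> simp [pvComb]

lemma pvMinT_attained (t : String → Option Nat) (l : List String) (m : Nat)
    (h : pvMinT t l = some m) : (l.find? (fun u => t u == some m)).isSome := by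
  induction l generalizing m with
  | nil => simp [pvMinT] at h
  | cons u r ih =>
    simp only [pvMinT] at h
    rcases hu : t u with _ | k <;> rcases hr : pvMinT t r with _ | m' <;>
      rw [hu, hr] at h <;> simp only [pvOmin] at h
    · exact absurd h (by simp)
    · rcases Option.some.inj h with rfl
      simp only [List.find?, hu]
      simpa using ih m' hr
    · rcases Option.some.inj h with rfl
      simp [List.find?, hu]
    · rcases Option.some.inj h with rfl
      by_cases hk : k = min k m'
      · simp [List.find?, hu, ← hk]
      · have hmm : min k m' = m' := by omega
        have hne : (some k == some (min k m')) = false := by simp; omega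
        simp only [List.find?, hu, hne]
        rw [hmm]
        exact ih m' hr

lemma pvMinT_eq_none (t : String → Option Nat) (l : List String)
    (h : pvMinT t l = none) : ∀ v ∈ l, t v = none := by
  induction l with
  | nil => simp
  | cons u r ih =>
    simp only [pvMinT] at h
    rcases hu : t u with _ | k <;> rcases hr : pvMinT t r with _ | m' <;>
      rw [hu, hr] at h <;> simp only [pvOmin] at h
    · intro v hv
      rcases List.mem_cons.mp hv with rfl | hvr
      · exact hu
      · exact ih hr v hvr
    all_goals exact absurd h (by simp)

-- the single left-to-right pass computes the first element of minimal tier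
lemma pvFold_eq_arg (t : String → Option Nat) (l : List String) :
    l.foldl (fun b u => pvComb b ((t u).map (fun k => (k, u)))) none = pvArg t l := by
  induction l with
  | nil => rfl
  | cons u r ih =>
    simp only [List.foldl]
    rw [pvFoldl_comb, ih]
    rcases hu : t u with _ | k <;> rcases hr : pvMinT t r with _ | m
    · simp [pvComb, pvArg, pvMinT, hu, hr, pvOmin]
    · -- u unranked, r has minimum m
      unfold pvArg
      simp only [pvMinT, hu, hr, pvOmin, Option.map_none, List.find?]
      cases hf : r.find? (fun v => t v == some m) <;> simp [pvComb, hf]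
    · -- u ranked k, r empty of ranks
      have hnone : r.find? (fun v => t v == some k) = none := by
        apply List.find?_eq_none.mpr
        intro v hv hvk
        rw [pvMinT_eq_none t r hr v hv] at hvk
        simp at hvk
      unfold pvArg
      simp only [pvMinT, hu, hr, pvOmin, Option.map_some, List.find?]
      simp [pvComb]
    · -- both ranked
      have hsome := pvMinT_attained t r m hr
      rcases hf : r.find? (fun v => t v == some m) with _ | v
      · rw [hf] at hsome; simp at hsome
      · simp only [pvArg, pvMinT, hu, hr, pvOmin, hf, Option.map_some]
        by_cases hkm : m < k
        · have h1 : min k m = m := by omega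
          have h2 : (t u == some m) = false := by simp [hu]; omega
          simp only [pvMinT, hu, hr, pvOmin, h1, List.find?, hf, Option.map_some]
          have h3 : (k == m) = false := by simp; omega
          simp only [show ∀ x, pvComb none x = x from fun x => rfl, pvComb_some]
          simp [hkm, h3]
        · have h1 : min k m = k := by omega
          have h2 : (t u == some k) = true := by simp [hu]
          simp only [pvMinT, hu, hr, pvOmin, h1, List.find?, Option.map_some]
          simp only [show ∀ x, pvComb none x = x from fun x => rfl, pvComb_some]
          simp [hkm, h2]

-- the cascade of scans equals picking the first element of minimal induced tier
lemma pvMinT_shift (t t' : String → Option Nat) (k : Nat) (l : List String)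
    (h : ∀ v ∈ l, t' v = (t v).map (· + k)) :
    pvMinT t' l = (pvMinT t l).map (· + k) := by
  induction l with
  | nil => rfl
  | cons u r ih =>
    simp only [pvMinT]
    rw [h u (by simp), ih (fun v hv => h v (by simp [hv]))]
    rcases t u with _ | a <;> rcases pvMinT t r with _ | b <;> simp [pvOmin] <;> omega

lemma pvPick_shift (t t' : String → Option Nat) (k : Nat) (l : List String)
    (h : ∀ v ∈ l, t' v = (t v).map (· + k)) :
    pvPick t' l = pvPick t l := by
  unfold pvPick
  rw [pvMinT_shift t t' k l h]
  rcases pvMinT t l with _ | m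
  · rfl
  · simp only [Option.map_some]
    apply pvFind_congr
    intro v hv
    rw [h v hv]
    rcases t v with _ | a <;> simp <;> omega

lemma pvCascade_eq_pick (cs : List (String → Bool)) (l : List String) :
    pvCascade cs l = pvPick (pvTf cs) l := by
  induction cs generalizing l with
  | nil =>
    have : pvMinT (pvTf []) l = none := by
      induction l with
      | nil => rfl
      | cons u r ih => simp [pvMinT, pvOmin, ih, show pvTf ([] : List (String → Bool)) u = none from rfl]
    simp [pvCascade, pvPick, this]
  | cons c cs ih =>
    simp only [pvCascade]
    rcases hf : l.find? c with _ | u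
    · -- c holds nowhere in l: tiers shift by one
      have hall : ∀ v ∈ l, c v = false := by
        intro v hv
        have := List.find?_eq_none.mp hf v hv
        simpa using this
      have hsh : ∀ v ∈ l, pvTf (c :: cs) v = (pvTf cs v).map (· + 1) := by
        intro v hv
        simp [pvTf, List.findIdx?_cons, hall v hv]
      rw [ih, pvPick_shift (pvTf cs) (pvTf (c :: cs)) 1 l hsh]
    · -- u is the first element satisfying c, and tier 0 is attained
      have hcu : c u = true := List.find?_some hf
      have hzero : ∀ v ∈ l, (pvTf (c :: cs) v == some 0) = c v := by
        intro v hv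
        rcases hcv : c v with _ | _ <;> simp [pvTf, List.findIdx?_cons, hcv]
      have hmem : u ∈ l := List.mem_of_find?_eq_some hf
      have hmin : pvMinT (pvTf (c :: cs)) l = some 0 := by
        clear hf
        induction l with
        | nil => simp at hmem
        | cons w r ihl =>
          simp only [pvMinT]
          rcases List.mem_cons.mp hmem with rfl | hwr
          · simp [pvTf, List.findIdx?_cons, hcu, pvOmin]
            rcases pvMinT (pvTf (c :: cs)) r with _ | b <;> simp [pvOmin]
          · rw [ihl (fun v hv => hzero v (by simp [hv])) hwr]
            rcases pvTf (c :: cs) w with _ | a <;> simp [pvOmin]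
      simp only [pvPick, hmin]
      rw [pvFind_congr l _ c hzero, hf]

-- ---- the condition list matching each of A's four regimes ----
def pvCs (lc : String) (voe : Bool) : List (String → Bool) :=
  (if lc = "" then [] else [pvC0 lc, pvC1 lc, pvC2]) ++
    (if voe then [pvC2] else [pvC3, pvC4, pvC5, fun _ => true])

-- "lc-ub occurs in s" implies "lc occurs in s"
lemma pvUb_imp (lc s : String) (h : PySem.Str.isIn (lc ++ "-ub") s = true) :
    PySem.Str.isIn lc s = true := by
  rw [PySem.Str.isIn_iff_infix] at h ⊢
  rw [String.toList_append] at h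
  exact ((List.prefix_append lc.toList _).isInfix).trans h

-- B's tier equals the cascade-induced tier (up to a constant shift) in every regime
set_option maxHeartbeats 4000000 in
lemma pvTier_eq_tf_code (lc : String) (voe : Bool) (u : String) (hlc : lc ≠ "") :
    pvTier lc voe u = pvTf (pvCs lc voe) u := by
  have hlcb : (lc != "") = true := by simp [hlc]
  have hlcb2 : (lc == "") = false := by simp [hlc]
  have hub : PySem.Chars.isIn lc.toList (PySem.Chars.lower u.toList) = false →
      PySem.Chars.isIn (lc.toList ++ ['-', 'u', 'b']) (PySem.Chars.lower u.toList) = false := by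
    intro h
    cases hx : PySem.Chars.isIn (lc.toList ++ ['-', 'u', 'b']) (PySem.Chars.lower u.toList)
    · rfl
    · have h2 := pvUb_imp lc (PySem.Str.lower u) (by simp [PySem.Str.isIn_eq]; simpa using hx)
      rw [PySem.Str.isIn_eq] at h2
      simp at h2
      rw [h] at h2
      cases h2
  unfold pvTier pvTf
  simp only [pvCs, if_neg hlc]
  cases voe <;>
  cases hA : PySem.Chars.isIn lc.toList (PySem.Chars.lower u.toList) <;>
  cases hM : PySem.Chars.isIn ['.', 'm', '3', 'u', '8'] (PySem.Chars.lower u.toList) <;>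
  cases hN : PySem.Chars.isIn ['_', 'H', 'L', 'S', '_', 'm', 's', 'n'] u.toList <;>
  cases hP : PySem.Chars.isIn ['_', 'H', 'L', 'S', '_', 'p', 'a', 'r', 't'] u.toList <;>
  cases hPl1 : PySem.Chars.isIn
    ['s','u','p','r','e','m','e','j','a','v','.','c','o','m','/','s','u','p','j','a','v']
    (PySem.Chars.lower u.toList) <;>
  cases hPl2 : PySem.Chars.isIn ['t','u','r','b','o','v','i','d','h','l','s','.','c','o','m','/','t','/']
    (PySem.Chars.lower u.toList) <;>
  cases hS : PySem.Chars.isIn ['s','t','r','e','a','m','t','a','p','e'] (PySem.Chars.lower u.toList) <;>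
  cases hG : PySem.Chars.isIn ['g','e','t','_','v','i','d','e','o'] (PySem.Chars.lower u.toList) <;>
    simp [List.findIdx?_cons, pvC0, pvC1, pvC2, pvC3, pvC4, pvC5,
      hA, hM, hN, hP, hPl1, hPl2, hS, hG, hlcb, hlcb2, hub]

set_option maxHeartbeats 4000000 in
lemma pvTier_eq_tf_nocode (voe : Bool) (u : String) :
    pvTier "" voe u = (pvTf (pvCs "" voe) u).map (· + (if voe then 2 else 3)) := by
  unfold pvTier pvTf
  simp only [pvCs, if_pos (rfl : ("" : String) = "")]
  cases voe <;>
  cases hM : PySem.Chars.isIn ['.', 'm', '3', 'u', '8'] (PySem.Chars.lower u.toList) <;>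
  cases hN : PySem.Chars.isIn ['_', 'H', 'L', 'S', '_', 'm', 's', 'n'] u.toList <;>
  cases hP : PySem.Chars.isIn ['_', 'H', 'L', 'S', '_', 'p', 'a', 'r', 't'] u.toList <;>
  cases hPl1 : PySem.Chars.isIn
    ['s','u','p','r','e','m','e','j','a','v','.','c','o','m','/','s','u','p','j','a','v']
    (PySem.Chars.lower u.toList) <;>
  cases hPl2 : PySem.Chars.isIn ['t','u','r','b','o','v','i','d','h','l','s','.','c','o','m','/','t','/']
    (PySem.Chars.lower u.toList) <;>
  cases hS : PySem.Chars.isIn ['s','t','r','e','a','m','t','a','p','e'] (PySem.Chars.lower u.toList) <;>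
  cases hG : PySem.Chars.isIn ['g','e','t','_','v','i','d','e','o'] (PySem.Chars.lower u.toList) <;>
    simp [List.findIdx?_cons, pvC2, pvC3, pvC4, pvC5, hM, hN, hP, hPl1, hPl2, hS, hG]

-- a `filter`-then-head in A is a fresh scan: it equals a find?
lemma pvFilterHead (l : List String) (p : String → Bool) (e : Option String) :
    (match l.filter p with | x :: _ => some x | [] => e) =
      (match l.find? p with | some x => some x | none => e) := by
  rw [← List.head?_filter]
  cases l.filter p <;> rfl

lemma pvFindTrue (l : List String) : l.find? (fun _ => true) = l.head? := by
  cases l <;> rfl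

lemma pvCascade_nil (cs : List (String → Bool)) : pvCascade cs [] = none := by
  induction cs with
  | nil => rfl
  | cons c cs ih => simpa [pvCascade] using ih

-- A's tail section equals the cascade over the matching condition list
lemma pvGeneral_eq (cands : List String) (voe : Bool) (h : cands ≠ []) :
    pvGeneral cands voe =
      pvCascade (if voe then [pvC2] else [pvC3, pvC4, pvC5, fun _ => true]) cands := by
  cases voe
  · simp only [pvGeneral, Bool.false_eq_true, if_neg (by simp : ¬False)]
    rw [pvFilterHead, pvFilterHead]
    simp only [pvCascade]
    cases cands.find? pvC3 <;> [skip; rfl]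
    cases cands.find? pvC4 <;> [skip; rfl]
    cases cands.find? pvC5 <;> [skip; rfl]
    rw [pvFindTrue]
    cases hc : cands
    · exact absurd hc h
    · rfl
  · simp only [pvGeneral, if_true]
    rw [pvFilterHead]
    simp only [pvCascade]
    try rfl

-- A's nested returns are exactly the cascade over pvCs
lemma pvA_eq_cascade (urls : List String) (voe : Bool) (code : Option String) :
    get_downloadable_url urls voe code =
      pvCascade (pvCs (PySem.Str.replace (PySem.Str.lower (code.getD "")) " " "") voe)
        (urls.filter pvIsHttp) := by
  unfold get_downloadable_url
  simp only []
  by_cases hE : (urls.filter pvIsHttp).isEmpty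
  · rw [if_pos hE, List.isEmpty_iff.mp hE, pvCascade_nil]
  · rw [if_neg hE]
    have hne : urls.filter pvIsHttp ≠ [] := by
      intro hcon; exact hE (by simp [hcon])
    by_cases hlc : PySem.Str.replace (PySem.Str.lower (code.getD "")) " " "" = ""
    · rw [if_pos (by simp [hlc]), pvGeneral_eq _ _ hne]
      simp [pvCs, hlc]
    · rw [if_neg (by simp [hlc])]
      simp only [pvCs, if_neg hlc]
      simp only [pvCascade, List.cons_append, List.nil_append]
      cases (urls.filter pvIsHttp).find? (pvC0 _) <;> [skip; rfl]
      cases (urls.filter pvIsHttp).find? (pvC1 _) <;> [skip; rfl]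
      rw [pvFilterHead]
      cases (urls.filter pvIsHttp).find? pvC2 <;> [skip; rfl]
      rw [pvGeneral_eq _ _ hne]

-- B computes pvPick of its tier over the candidates
lemma pvB_eq_pick (urls : List String) (voe : Bool) (code : Option String) :
    get_downloadable_url_alt urls voe code =
      pvPick (pvTier (PySem.Str.replace (PySem.Str.lower (code.getD "")) " " "") voe)
        (urls.filter pvIsHttp) := by
  unfold get_downloadable_url_alt
  simp only
  have hstep : ∀ (b : Option (Nat × String)) u,
      pvStep (PySem.Str.replace (PySem.Str.lower (code.getD "")) " " "") voe b u =
        if pvIsHttp u then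
          pvComb b ((pvTier (PySem.Str.replace (PySem.Str.lower (code.getD "")) " " "") voe u).map
            (fun t => (t, u))) else b := fun b u => pvStep_eq _ _ _ _
  rw [funext fun b => funext fun u => hstep b u]
  rw [← List.foldl_filter]
  rw [pvFold_eq_arg]
  unfold pvArg pvPick
  rcases pvMinT _ _ with _ | m
  · rfl
  · simp

-- ===== VERDICT (by name: the statement is the Claim_ definition above) =====
set_option maxHeartbeats 1000000 in
theorem get_downloadable_url_spec : Claim_equal_get_downloadable_url := by
  intro urls voe code _
  unfold Spec_get_downloadable_url
  rw [pvB_eq_pick, pvA_eq_cascade, pvCascade_eq_pick]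
  by_cases hlc : PySem.Str.replace (PySem.Str.lower (code.getD "")) " " "" = ""
  · rw [hlc]
    exact (pvPick_shift _ _ _ _ (fun v _ => pvTier_eq_tf_nocode voe v)).symm
  · have h : pvTier (PySem.Str.replace (PySem.Str.lower (code.getD "")) " " "") voe =
        pvTf (pvCs (PySem.Str.replace (PySem.Str.lower (code.getD "")) " " "") voe) :=
      funext fun u => pvTier_eq_tf_code _ voe u hlc
    rw [h]
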